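-- pv_equiv track=rewrite | github.com/josephmccrae-utsa/TIP101 | Unit 2/S2 Problem Sets/Problem Set 1/p3_highest_priority_task.py | get_highest_priority_task
-- ===== SOURCE A (Python) =====
-- def get_highest_priority_task(tasks):
-- 	popped = ""
-- 	tasks_dict = sorted(tasks.keys())
-- 	max_value = 0
-- 	for key in tasks_dict:
-- 		if tasks[key] > max_value:
-- 			max_value = tasks[key]
-- 			popped = key
-- 	tasks.pop(popped)
-- 	return popped
-- ===== SOURCE B (Python) =====
-- def get_highest_priority_task(tasks):
--     max_value = max(tasks.values(), default=0)
--     if max_value > 0: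
--         popped = min(k for k, v in tasks.items() if v == max_value)
--     else:
--         popped = ""
--     tasks.pop(popped)
--     return popped
-- ===== Notes on version B (the rewrite author's own statement) =====
-- stated objective: faster
-- what changed: replaces sort-the-keys-then-scan with two O(n) aggregate passes: max over the values, then min over the keys attaining that max (no sorting, no running best-state loop)
import Mathlib
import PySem

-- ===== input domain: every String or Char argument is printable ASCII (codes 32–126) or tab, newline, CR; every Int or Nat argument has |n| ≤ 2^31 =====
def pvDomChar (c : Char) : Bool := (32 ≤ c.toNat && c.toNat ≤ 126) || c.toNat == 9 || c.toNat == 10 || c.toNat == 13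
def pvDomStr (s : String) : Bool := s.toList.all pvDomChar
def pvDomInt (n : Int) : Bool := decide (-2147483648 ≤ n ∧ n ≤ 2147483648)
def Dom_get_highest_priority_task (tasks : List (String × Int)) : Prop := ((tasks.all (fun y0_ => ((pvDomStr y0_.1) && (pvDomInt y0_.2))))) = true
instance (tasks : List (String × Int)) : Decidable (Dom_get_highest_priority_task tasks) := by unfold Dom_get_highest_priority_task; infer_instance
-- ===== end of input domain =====

-- B replaces A's sort-the-keys-then-scan with two aggregate passes (max over the values, then
-- min over the keys attaining that max) — no sorting; both Pythons also pop the returned key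
-- from the dict (the same mutation) — the equivalence proved here is about the return value.


-- ===== PORT A =====
-- sorted(tasks.keys()); loop keeping (max_value, popped) with a strict '>' on the value only.
-- tasks[key] is looked up with getD and a dummy default: key comes from tasks.keys(), so it is
-- always present and the lookup is exact.  tasks.pop(popped) only mutates (or raises KeyError
-- when popped is absent — exactly the inputs Pre_ excludes); the return value is popped.
def get_highest_priority_task (tasks : List (String × Int)) : String :=
  let d := PySem.Dict.ofList tasks
  let popped := ""
  let tasks_dict := PySem.List.sorted d.keys (fun k => k)
  let r := tasks_dict.foldl (fun (s : Int × String) key =>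
      if d.getD key 0 > s.1 then (d.getD key 0, key) else s) ((0 : Int), popped)
  r.2

-- ===== PORT B =====
-- max(tasks.values(), default=0) is PySem.List.maxD; the min over a nonempty generator is
-- PySem.List.min? with .getD "" as the totality guard (the branch guarantees the filtered
-- list is nonempty, so Python's min never raises there).
def get_highest_priority_task_alt (tasks : List (String × Int)) : String :=
  let d := PySem.Dict.ofList tasks
  let max_value := PySem.List.maxD d.values (fun v => v) 0
  let popped :=
    if max_value > 0 then
      (PySem.List.min? ((d.items.filter (fun kv => kv.2 == max_value)).map Prod.fst)
        (fun k => k)).getD ""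
    else ""
  popped

-- ===== PRECONDITION & SPEC =====
-- Pre_ excludes exactly the inputs on which both Pythons raise KeyError at tasks.pop(popped):
-- those where no value is positive (so popped stays "") and "" is not a key.
def Pre_get_highest_priority_task (tasks : List (String × Int)) : Prop :=
  (∃ v ∈ (PySem.Dict.ofList tasks).values, 0 < v) ∨ "" ∈ (PySem.Dict.ofList tasks).keys
instance (tasks : List (String × Int)) : Decidable (Pre_get_highest_priority_task tasks) := by
  unfold Pre_get_highest_priority_task; infer_instance
def pvWitness_get_highest_priority_task : (List (String × Int)) := [("a", 1), ("b", 3)]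
def Spec_get_highest_priority_task (tasks : List (String × Int)) (out : String) : Prop := out = get_highest_priority_task_alt tasks
instance (tasks : List (String × Int)) (out : String) : Decidable (Spec_get_highest_priority_task tasks out) := by unfold Spec_get_highest_priority_task; infer_instance

-- ===== CLAIM (what is proved, stated in full; the proofs are below) =====
def Claim_equal_get_highest_priority_task : Prop := ∀ (tasks : List (String × Int)), Dom_get_highest_priority_task tasks → Pre_get_highest_priority_task tasks → Spec_get_highest_priority_task tasks (get_highest_priority_task tasks)

-- ===== LEMMAS AND PROOFS =====

-- A's loop body, rephrased on (key, value) pairs.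
def pvStepA (s : Int × String) (kv : String × Int) : Int × String :=
  if kv.2 > s.1 then (kv.2, kv.1) else s

-- the running maximum A's loop maintains in its first component
def pvVmax (l : List (String × Int)) (m : Int) : Int :=
  l.foldl (fun a x => max a x.2) m

lemma pvVmax_cons (a : String × Int) (t : List (String × Int)) (m : Int) :
    pvVmax (a :: t) m = pvVmax t (max m a.2) := rfl

lemma pv_le_vmax (l : List (String × Int)) (m : Int) :
    m ≤ pvVmax l m ∧ ∀ x ∈ l, x.2 ≤ pvVmax l m :=
  PySem.List.le_foldl_max_int l (fun x => x.2) m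

lemma pvVmax_attained : ∀ (l : List (String × Int)) (m : Int),
    pvVmax l m = m ∨ ∃ x ∈ l, x.2 = pvVmax l m := by
  intro l
  induction l with
  | nil => intro m; exact Or.inl rfl
  | cons a t ih =>
    intro m
    rw [pvVmax_cons]
    rcases ih (max m a.2) with h | ⟨x, hx, hx2⟩
    · rw [h]
      rcases le_total a.2 m with hm | hm
      · exact Or.inl (max_eq_left hm)
      · exact Or.inr ⟨a, List.mem_cons_self, (max_eq_right hm).symm⟩
    · exact Or.inr ⟨x, List.mem_cons_of_mem _ hx, hx2⟩

-- if nothing in l beats m, A's fold leaves the state alone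
lemma pv_fold_stay : ∀ (l : List (String × Int)) (m : Int) (p : String),
    (∀ x ∈ l, x.2 ≤ m) → l.foldl pvStepA (m, p) = (m, p) := by
  intro l
  induction l with
  | nil => intro m p _; rfl
  | cons a t ih =>
    intro m p h
    have ha : ¬ a.2 > m := not_lt.mpr (h a List.mem_cons_self)
    simp only [List.foldl_cons, pvStepA, if_neg ha]
    exact ih m p fun x hx => h x (List.mem_cons_of_mem _ hx)

-- A's fold returns the key of the FIRST element whose value equals the overall maximum,
-- provided that maximum exceeds the start value.
lemma pv_fold_snd : ∀ (l : List (String × Int)) (m : Int) (p : String),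
    pvVmax l m > m →
    ∀ kv, l.find? (fun x => x.2 == pvVmax l m) = some kv →
    (l.foldl pvStepA (m, p)).2 = kv.1 := by
  intro l
  induction l with
  | nil => intro m p h kv hf; rw [pvVmax] at h; simp at h
  | cons a t ih =>
    intro m p h kv hf
    rw [pvVmax_cons] at h
    by_cases ha : a.2 > m
    · have hmax : max m a.2 = a.2 := max_eq_right (le_of_lt ha)
      rw [hmax] at h
      simp only [List.foldl_cons, pvStepA, if_pos ha]
      by_cases hgt : pvVmax t a.2 > a.2
      · -- a does not attain the max; continue in t
        have hne : ¬ (a.2 == pvVmax (a :: t) m) := by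
          rw [pvVmax_cons, hmax]
          simpa using ne_of_lt hgt
        rw [List.find?_cons_of_neg (by simpa using hne)] at hf
        have hf' : t.find? (fun x => x.2 == pvVmax t a.2) = some kv := by
          rw [pvVmax_cons, hmax] at hf; exact hf
        exact ih a.2 a.1 hgt kv hf'
      · -- the max IS a.2: a is the first attainer and later steps never fire
        have heq : pvVmax t a.2 = a.2 :=
          le_antisymm (not_lt.mp hgt) (pv_le_vmax t a.2).1
        have hkv : kv = a := by
          rw [List.find?_cons_of_pos (by simp [pvVmax_cons, hmax, heq])] at hf
          exact (Option.some_inj.mp hf).symm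
        rw [hkv, pv_fold_stay t a.2 a.1
          (fun x hx => heq ▸ (pv_le_vmax t a.2).2 x hx)]
    · have hmax : max m a.2 = m := max_eq_left (not_lt.mp ha)
      rw [hmax] at h
      simp only [List.foldl_cons, pvStepA, if_neg ha]
      have hne : ¬ (a.2 == pvVmax (a :: t) m) := by
        rw [pvVmax_cons, hmax]
        have : a.2 ≤ m := not_lt.mp ha
        simpa using ne_of_lt (lt_of_le_of_lt this h)
      rw [List.find?_cons_of_neg (by simpa using hne)] at hf
      have hf' : t.find? (fun x => x.2 == pvVmax t m) = some kv := by
        rw [pvVmax_cons, hmax] at hf; exact hf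
      exact ih m p h kv hf'

-- The two ports return the same string on EVERY input list (Pre_ only governs the pop).
lemma pv_ports_eq (tasks : List (String × Int)) :
    get_highest_priority_task tasks = get_highest_priority_task_alt tasks := by
  show (List.foldl (fun (s : Int × String) key =>
      if (PySem.Dict.ofList tasks).getD key 0 > s.1
      then ((PySem.Dict.ofList tasks).getD key 0, key) else s) ((0 : Int), "")
      (PySem.List.sorted (PySem.Dict.ofList tasks).keys (fun k => k))).2
    = _
  set d := PySem.Dict.ofList tasks with hd
  have hnd : d.keys.Nodup := PySem.Dict.nodup_keys_ofList tasks
  set si := PySem.List.sorted d.items (fun p => p.1) with hsi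
  have hperm : si.Perm d.items := PySem.List.sorted_perm _ _ _
  have hpermk : (si.map Prod.fst).Perm d.keys := by
    simpa [PySem.Dict.keys] using hperm.map Prod.fst
  have hndsi : (si.map Prod.fst).Nodup := hpermk.nodup_iff.mpr hnd
  have hpw_lt : si.Pairwise (fun a b => a.1 < b.1) := by
    have hle : si.Pairwise (fun a b => a.1 ≤ b.1) := PySem.List.sorted_pairwise _ _
    have hne : si.Pairwise (fun a b => a.1 ≠ b.1) := List.pairwise_map.mp hndsi
    exact (hle.and hne).imp (fun h => lt_of_le_of_ne h.1 h.2)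
  have hkeys : PySem.List.sorted d.keys (fun k => k) = si.map Prod.fst :=
    PySem.List.sorted_eq_of_perm_of_pairwise_lt _ _ _ hpermk (List.pairwise_map.mpr hpw_lt)
  rw [hkeys, List.foldl_map]
  have hlookup : List.foldl (fun (s : Int × String) (x : String × Int) =>
        if d.getD x.1 0 > s.1 then (d.getD x.1 0, x.1) else s) ((0 : Int), "") si
      = List.foldl pvStepA ((0 : Int), "") si := by
    refine PySem.List.foldl_congr_mem si _ _ _ ?_
    intro acc x hx
    have hmem : (x.1, x.2) ∈ d.items := by simpa using hperm.mem_iff.mp hx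
    have hval : d.getD x.1 0 = x.2 := PySem.Dict.getD_of_mem_items d hmem hnd 0
    rw [hval]
    rfl
  rw [hlookup]
  -- now relate A's fold to B's two aggregate passes
  show (List.foldl pvStepA ((0 : Int), "") si).2 = get_highest_priority_task_alt tasks
  have hvals : d.values = d.items.map Prod.snd := rfl
  rcases hM : PySem.List.max? d.values (fun v => v) with _ | M
  · -- values empty ⇒ items empty ⇒ si empty: both sides are ""
    have hnil : d.items = [] := by
      have := (PySem.List.max?_eq_none_iff d.values (fun v => v)).mp hM
      rw [hvals] at this
      exact List.map_eq_nil_iff.mp this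
    have hsinil : si = [] := List.Perm.eq_nil (hnil ▸ hperm)
    show _ = get_highest_priority_task_alt tasks
    unfold get_highest_priority_task_alt
    rw [hsinil]
    simp only [PySem.List.maxD, ← hd, hM, List.foldl_nil, Option.getD_none]
    norm_num
  · have hMD : PySem.List.maxD d.values (fun v => v) 0 = M := by
      simp [PySem.List.maxD, hM]
    have hMisMax : ∀ x ∈ si, x.2 ≤ M := by
      intro x hx
      have : x.2 ∈ d.values := by
        rw [hvals]
        exact List.mem_map_of_mem (hperm.mem_iff.mp hx)
      exact PySem.List.max?_isMax hM _ this
    by_cases hMpos : M > 0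
    · -- the maximum is positive: A returns the first (= alphabetically least) attainer
      -- M is attained by some pair of si
      have hAtt : ∃ x ∈ si, x.2 = M := by
        have hmem : M ∈ d.values := PySem.List.max?_mem hM
        rw [hvals] at hmem
        obtain ⟨kv, hkv, hkv2⟩ := List.mem_map.mp hmem
        exact ⟨kv, hperm.mem_iff.mpr hkv, hkv2⟩
      have hV : pvVmax si 0 = M := by
        obtain ⟨x, hx, hx2⟩ := hAtt
        have h1 : M ≤ pvVmax si 0 := hx2 ▸ (pv_le_vmax si 0).2 x hx
        rcases pvVmax_attained si 0 with h | ⟨y, hy, hy2⟩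
        · omega
        · exact le_antisymm (hy2 ▸ hMisMax y hy) h1
      have hVpos : pvVmax si 0 > 0 := hV ▸ hMpos
      -- the first attainer exists
      have hfs : (si.find? (fun x => x.2 == pvVmax si 0)).isSome := by
        rw [List.find?_isSome]
        obtain ⟨x, hx, hx2⟩ := hAtt
        exact ⟨x, hx, by simp [hV, hx2]⟩
      obtain ⟨kv, hkv⟩ := Option.isSome_iff_exists.mp hfs
      have hkv2 : kv.2 = M := by
        have := List.find?_some hkv
        simpa [hV] using this
      obtain ⟨-, as, bs, hsplit, hnot⟩ := List.find?_eq_some_iff_append.mp hkv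
      -- kv's key is ≤ every key attaining M (keys of si strictly increase)
      have hkvmin : ∀ x ∈ si, x.2 = M → kv.1 ≤ x.1 := by
        intro x hx hx2
        rw [hsplit] at hx hpw_lt
        rcases List.mem_append.mp hx with hx | hx
        · exfalso
          have h1 := hnot x hx
          simp [hx2, hV] at h1
        · rcases List.mem_cons.mp hx with rfl | hx
          · exact le_refl _
          · exact le_of_lt
              ((List.pairwise_cons.mp (List.pairwise_append.mp hpw_lt).2.1).1 x hx)
      -- B's filtered key list and its minimum
      have hkvsi : kv ∈ si := by rw [hsplit]; simp
      have hkvfilt : kv.1 ∈ (d.items.filter (fun x => x.2 == M)).map Prod.fst :=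
        List.mem_map_of_mem (List.mem_filter.mpr ⟨hperm.mem_iff.mp hkvsi, by simp [hkv2]⟩)
      obtain ⟨k0, hk0⟩ : ∃ k0, PySem.List.min?
          ((d.items.filter (fun x => x.2 == M)).map Prod.fst) (fun k => k) = some k0 := by
        rcases h : PySem.List.min? ((d.items.filter (fun x => x.2 == M)).map Prod.fst)
            (fun k => k) with _ | k0
        · rw [PySem.List.min?_eq_none_iff] at h
          rw [h] at hkvfilt
          exact absurd hkvfilt (List.not_mem_nil)
        · exact ⟨k0, h⟩
      -- the two candidate keys are equal
      have hk0kv : k0 = kv.1 := by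
        have h1 : k0 ≤ kv.1 := PySem.List.min?_isMin hk0 _ hkvfilt
        have h2 : kv.1 ≤ k0 := by
          have hk0mem := PySem.List.min?_mem hk0
          obtain ⟨x, hx, hx1⟩ := List.mem_map.mp hk0mem
          have hxf := List.mem_filter.mp hx
          exact hx1 ▸ hkvmin x (hperm.mem_iff.mpr hxf.1) (by simpa using hxf.2)
        exact le_antisymm h1 h2
      -- assemble
      have hA : (List.foldl pvStepA ((0 : Int), "") si).2 = kv.1 :=
        pv_fold_snd si 0 "" hVpos kv hkv
      rw [hA]
      unfold get_highest_priority_task_alt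
      simp only [← hd, hMD, if_pos hMpos, hk0, Option.getD_some, hk0kv]
    · -- the maximum is ≤ 0: A's state never changes, B takes the else branch
      have hstay : List.foldl pvStepA ((0 : Int), "") si = ((0 : Int), "") :=
        pv_fold_stay si 0 "" (fun x hx => le_trans (hMisMax x hx) (not_lt.mp hMpos))
      rw [hstay]
      unfold get_highest_priority_task_alt
      simp only [← hd, hMD, if_neg hMpos]

-- ===== VERDICT (by name: the statement is the Claim_ definition above) =====
theorem get_highest_priority_task_spec : Claim_equal_get_highest_priority_task := by
  intro tasks _ _
  unfold Spec_get_highest_priority_task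
  exact pv_ports_eq tasks
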